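-- pv_equiv track=rewrite | github.com/mvilchis/rp_migration_channel | utils.py | get_next_id_fb
-- ===== SOURCE A (Python) =====
-- def get_next_id_fb(current_id):
--     next_id = list(current_id)
--     found_idx = False
--     #Iterate reverse
--     for idx in range(len(current_id)-1,-1,-1):
--         if current_id[idx] != "Z":
--             next_id[idx] = chr(ord(current_id[idx]) + 1)
--             found_idx = True
--             break
--         else:
--             next_id[idx] = "A" #Reset las item
--     if not found_idx: #Then add new index
--         next_id +="A"
--     return ''.join(next_id)
-- ===== SOURCE B (Python) =====
-- def get_next_id_fb(current_id):
--     stripped = current_id.rstrip("Z")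
--     k = len(current_id) - len(stripped)
--     if not stripped:
--         return "A" * (len(current_id) + 1)
--     return stripped[:-1] + chr(ord(stripped[-1]) + 1) + "A" * k
-- ===== Notes on version B (the rewrite author's own statement) =====
-- stated objective: simpler
-- what changed: Replaces the reverse in-place mutate loop with break/flag by a measure-then-construct pass: strip the trailing run of 'Z's, bump the last remaining char, append that many 'A's.
import Mathlib
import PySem

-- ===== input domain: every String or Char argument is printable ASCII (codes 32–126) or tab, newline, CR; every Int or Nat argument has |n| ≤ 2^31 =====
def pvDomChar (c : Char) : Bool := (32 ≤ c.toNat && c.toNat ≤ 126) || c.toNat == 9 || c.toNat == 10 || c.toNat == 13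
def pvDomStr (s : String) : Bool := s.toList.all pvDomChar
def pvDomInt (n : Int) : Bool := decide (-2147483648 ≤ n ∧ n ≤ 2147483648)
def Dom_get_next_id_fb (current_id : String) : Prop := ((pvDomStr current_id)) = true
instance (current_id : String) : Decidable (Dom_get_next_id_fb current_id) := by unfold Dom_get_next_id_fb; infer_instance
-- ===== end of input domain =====

-- B replaces A's reverse mutate-with-break loop by a measure-then-construct pass
-- (strip trailing 'Z's, bump the last remaining char, append 'A's); objective: simpler.

-- ===== PORT A =====
-- The reverse for-loop over the char list: on the first non-'Z' char (from the right)
-- replace it by its successor and stop (found_idx = true); each 'Z' becomes 'A'.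
-- Operates on the REVERSED char list so the loop is structural recursion.
def aLoop : List Char → List Char × Bool
  | [] => ([], false)
  | c :: rest =>
    if c ≠ 'Z' then (Char.ofNat (c.toNat + 1) :: rest, true)
    else
      let p := aLoop rest
      ('A' :: p.1, p.2)

def get_next_id_fb (current_id : String) : String :=
  let p := aLoop current_id.toList.reverse
  let nid := p.1.reverse
  String.ofList (if p.2 then nid else nid ++ ['A'])

-- ===== PORT B =====
def get_next_id_fb_alt (current_id : String) : String :=
  let l := current_id.toList
  -- current_id.rstrip("Z") ported by hand (exact: strip set is the single char 'Z'):
  let stripped := (l.reverse.dropWhile (· == 'Z')).reverse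
  let k := l.length - stripped.length
  if stripped = [] then String.ofList (List.replicate (l.length + 1) 'A')
  else String.ofList (stripped.dropLast ++ [Char.ofNat ((stripped.getLastD 'A').toNat + 1)] ++ List.replicate k 'A')

-- ===== PRECONDITION & SPEC =====
def Spec_get_next_id_fb (current_id : String) (out : String) : Prop := out = get_next_id_fb_alt current_id
instance (current_id : String) (out : String) : Decidable (Spec_get_next_id_fb current_id out) := by unfold Spec_get_next_id_fb; infer_instance

-- ===== CLAIM (what is proved, stated in full; the proofs are below) =====
def Claim_equal_get_next_id_fb : Prop := ∀ (current_id : String), Dom_get_next_id_fb current_id → Spec_get_next_id_fb current_id (get_next_id_fb current_id)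

-- ===== LEMMAS AND PROOFS =====

-- Characterisation of A's loop in terms of takeWhile/dropWhile on the (reversed) list.
theorem aLoop_eq (l : List Char) :
    aLoop l =
      match l.dropWhile (· == 'Z') with
      | [] => (List.replicate l.length 'A', false)
      | c :: rest =>
          (List.replicate (l.takeWhile (· == 'Z')).length 'A' ++ Char.ofNat (c.toNat + 1) :: rest, true) := by
  induction l with
  | nil => simp [aLoop]
  | cons c rest ih =>
    by_cases h : c = 'Z'
    · subst h
      simp only [aLoop, List.dropWhile, List.takeWhile, ih]
      cases hd : rest.dropWhile (· == 'Z') <;> simp [List.replicate_succ]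
    · have hb : (c == 'Z') = false := by simpa using h
      simp [aLoop, List.dropWhile, List.takeWhile, h, hb]

theorem get_next_id_fb_spec : Claim_equal_get_next_id_fb := by
  intro s _
  unfold Spec_get_next_id_fb get_next_id_fb get_next_id_fb_alt
  have hlen := congrArg List.length
    (List.takeWhile_append_dropWhile (p := (· == 'Z')) (l := s.toList.reverse))
  simp only [List.length_append] at hlen
  rw [aLoop_eq]
  cases hd : s.toList.reverse.dropWhile (· == 'Z') with
  | nil =>
    simp only [hd]
    simp [List.reverse_replicate, List.replicate_succ']
  | cons c rest =>
    simp only [hd]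
    rw [hd] at hlen
    have hrl : s.toList.reverse.length = s.toList.length := List.length_reverse
    have hk : s.length - (rest.length + 1)
        = (s.toList.reverse.takeWhile (· == 'Z')).length := by
      have hsl : s.length = s.toList.length := by
        simp
      simp only [List.length_cons] at hlen
      omega
    simp [List.reverse_replicate]
    rw [hk]
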